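-- pv_equiv track=rewrite | github.com/linhdvu14/cp-sols | sols/CodeForces/1879_edu/D_Sum_of_XOR_Functions.py | solve
-- ===== SOURCE A (Python) =====
-- MOD = 998244353
--
-- BITS = 30
--
-- def solve(N, A):
--     res = 0
--
--     for i in range(BITS):
--         c0 = c1 = s0 = s1 = 0  # cnt/sum lengths of subarrays with even/odd 1s ending at each i
--         for a in A:
--             b = (a >> i) & 1
--             if not b:
--                 nc0 = c0 + 1
--                 nc1 = c1
--                 ns0 = s0 + c0 + 1
--                 ns1 = s1 + c1
--             else:
--                 nc0 = c1
--                 nc1 = c0 + 1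
--                 ns0 = s1 + c1
--                 ns1 = s0 + c0 + 1
--             c0, c1, s0, s1 = nc0, nc1, ns0, ns1
--             res = (res + (s1 << i)) % MOD
--
--     return res
-- ===== SOURCE B (Python) =====
-- MOD = 998244353
--
-- def solve(N, A):
--     # prefix-parity pairing: for each bit, pair each prefix with earlier
--     # opposite-parity prefixes; exact big-int total, single mod at the end
--     total = 0
--     for i in range(30):
--         p = 0
--         cnt = [1, 0]
--         sumidx = [0, 0]
--         for k, a in enumerate(A, 1):
--             p ^= (a >> i) & 1
--             total += (cnt[1 - p] * k - sumidx[1 - p]) << i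
--             cnt[p] += 1
--             sumidx[p] += k
--     return total % MOD
-- ===== Notes on version B (the rewrite author's own statement) =====
-- stated objective: alternative
-- what changed: Replaces A's subarray-ending DP (four counters of counts/length-sums of even/odd-parity subarrays ending at each index, accumulator reduced mod MOD every step) with prefix-parity pairing: per bit it walks prefix indices with a running parity and count/index-sum cells per parity, adds (cnt[1-p]*k - sumidx[1-p])<<i for each prefix, keeps the exact big-int total and takes one mod at the end.
import Mathlib
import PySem

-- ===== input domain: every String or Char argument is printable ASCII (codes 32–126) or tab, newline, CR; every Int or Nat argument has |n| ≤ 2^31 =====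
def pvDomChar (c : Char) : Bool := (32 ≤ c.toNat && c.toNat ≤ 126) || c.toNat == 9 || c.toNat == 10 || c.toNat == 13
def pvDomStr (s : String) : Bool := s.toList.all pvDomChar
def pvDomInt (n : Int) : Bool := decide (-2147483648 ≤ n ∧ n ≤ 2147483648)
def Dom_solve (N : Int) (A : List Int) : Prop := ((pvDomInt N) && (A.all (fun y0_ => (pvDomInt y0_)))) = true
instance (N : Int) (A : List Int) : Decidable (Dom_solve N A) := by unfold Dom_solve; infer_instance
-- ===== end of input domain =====

-- B replaces A's subarray-ending parity DP (counts/length-sums of subarrays ending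
-- at each index, res reduced mod MOD every step) by prefix-parity pairing: per bit,
-- pair each prefix index with the earlier opposite-parity prefixes via two
-- count/index-sum cells, accumulate the exact big-int total, single mod at the end
-- (objective: alternative decomposition).

-- ===== PORT A =====
-- state: (c0, c1, s0, s1, res); one step of A's inner loop at bit i
def stepA (i : Nat) (st : Int × Int × Int × Int × Int) (a : Int) : Int × Int × Int × Int × Int :=
  let b := PySem.Int.band (a >>> i) 1
  if b = 0 then
    (st.1 + 1, st.2.1, st.2.2.1 + st.1 + 1, st.2.2.2.1 + st.2.1,
     (st.2.2.2.2 + ((st.2.2.2.1 + st.2.1) <<< i)) % 998244353)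
  else
    (st.2.1, st.1 + 1, st.2.2.2.1 + st.2.1, st.2.2.1 + st.1 + 1,
     (st.2.2.2.2 + ((st.2.2.1 + st.1 + 1) <<< i)) % 998244353)

def solve (N : Int) (A : List Int) : Int :=
  (List.range 30).foldl (fun res i =>
    (A.foldl (stepA i) (0, 0, 0, 0, res)).2.2.2.2) 0

-- ===== PORT B =====
-- state: (p, cnt0, cnt1, sumidx0, sumidx1, total); the two-cell lists cnt / sumidx
-- of Source B are the two Int components, cnt[1-p] selected by an if on p
def stepB (i : Nat) (st : Int × Int × Int × Int × Int × Int) (ka : Int × Int) : Int × Int × Int × Int × Int × Int :=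
  let b := PySem.Int.band (ka.2 >>> i) 1
  let p := PySem.Int.bxor st.1 b
  let tot := st.2.2.2.2.2 +
    (((if p = 0 then st.2.2.1 else st.2.1) * ka.1 -
      (if p = 0 then st.2.2.2.2.1 else st.2.2.2.1)) <<< i)
  if p = 0 then (p, st.2.1 + 1, st.2.2.1, st.2.2.2.1 + ka.1, st.2.2.2.2.1, tot)
  else (p, st.2.1, st.2.2.1 + 1, st.2.2.2.1, st.2.2.2.2.1 + ka.1, tot)

def solve_alt (N : Int) (A : List Int) : Int :=
  ((List.range 30).foldl (fun tot i =>
    ((PySem.List.enumerate A 1).foldl (stepB i) (0, 1, 0, 0, 0, tot)).2.2.2.2.2) 0) % 998244353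

-- ===== PRECONDITION & SPEC =====
def Spec_solve (N : Int) (A : List Int) (out : Int) : Prop := out = solve_alt N A
instance (N : Int) (A : List Int) (out : Int) : Decidable (Spec_solve N A out) := by unfold Spec_solve; infer_instance

-- ===== CLAIM (what is proved, stated in full; the proofs are below) =====
def Claim_equal_solve : Prop := ∀ (N : Int) (A : List Int), Dom_solve N A → Spec_solve N A (solve N A)

-- ===== LEMMAS AND PROOFS =====

theorem bit01 (a : Int) (i : Nat) :
    PySem.Int.band (a >>> i) 1 = 0 ∨ PySem.Int.band (a >>> i) 1 = 1 := by
  rw [PySem.Int.band_one]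
  have h1 := PySem.Int.mod_nonneg (a >>> i) (b := 2) (by norm_num)
  have h2 := PySem.Int.mod_lt (a >>> i) (b := 2) (by norm_num)
  omega

-- the mod identity A maintains: reducing the accumulator each step = one mod of the sum
theorem mod_step (t c : Int) : (t % 998244353 + c) % 998244353 = (t + c) % 998244353 := by
  omega

-- inner-loop invariant: A's subarray-ending DP state is determined by B's
-- prefix-parity counters, and A's res tracks B's exact total mod MOD
theorem inner (i : Nat) : ∀ (L : List Int) (k c0 c1 s0 s1 res p C0 C1 T0 T1 tot : Int),
    (p = 0 ∧ c0 = C0 - 1 ∧ c1 = C1 ∧ s0 = C0 * k - T0 ∧ s1 = C1 * k - T1 ∨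
     p = 1 ∧ c0 = C1 - 1 ∧ c1 = C0 ∧ s0 = C1 * k - T1 ∧ s1 = C0 * k - T0) →
    res = tot % 998244353 →
    (L.foldl (stepA i) (c0, c1, s0, s1, res)).2.2.2.2 =
      ((PySem.List.enumerate L (k + 1)).foldl (stepB i) (p, C0, C1, T0, T1, tot)).2.2.2.2.2 % 998244353
  | [], k, c0, c1, s0, s1, res, p, C0, C1, T0, T1, tot, _, hres => by
      simpa [PySem.List.enumerate_nil] using hres
  | a :: L, k, c0, c1, s0, s1, res, p, C0, C1, T0, T1, tot, hinv, hres => by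
      rw [PySem.List.enumerate_cons, List.foldl_cons, List.foldl_cons]
      rcases bit01 a i with hb | hb <;>
        rcases hinv with ⟨hp, h1, h2, h3, h4⟩ | ⟨hp, h1, h2, h3, h4⟩ <;>
        subst hp h1 h2 h3 h4 <;>
        simp only [stepA, stepB, hb,
          show PySem.Int.bxor 0 0 = 0 from by decide, show PySem.Int.bxor 0 1 = 1 from by decide,
          show PySem.Int.bxor 1 0 = 1 from by decide, show PySem.Int.bxor 1 1 = 0 from by decide] <;>
        norm_num
      · -- p = 0, b = 0 : parity stays 0
        refine inner i L (k + 1) _ _ _ _ _ _ _ _ _ _ _ ?_ ?_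
        · exact Or.inl ⟨rfl, by ring, rfl, by ring, by ring⟩
        rw [hres, mod_step, Int.shiftLeft_eq, Int.shiftLeft_eq]
        ring_nf
      · -- p = 1, b = 0 : parity stays 1
        refine inner i L (k + 1) _ _ _ _ _ _ _ _ _ _ _ ?_ ?_
        · exact Or.inr ⟨rfl, by ring, rfl, by ring, by ring⟩
        rw [hres, mod_step, Int.shiftLeft_eq, Int.shiftLeft_eq]
        ring_nf
      · -- p = 0, b = 1 : parity flips to 1
        refine inner i L (k + 1) _ _ _ _ _ _ _ _ _ _ _ ?_ ?_
        · exact Or.inr ⟨rfl, by ring, rfl, by ring, by ring⟩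
        rw [hres, mod_step, Int.shiftLeft_eq, Int.shiftLeft_eq]
        ring_nf
      · -- p = 1, b = 1 : parity flips to 0
        refine inner i L (k + 1) _ _ _ _ _ _ _ _ _ _ _ ?_ ?_
        · exact Or.inl ⟨rfl, by ring, rfl, by ring, by ring⟩
        rw [hres, mod_step, Int.shiftLeft_eq, Int.shiftLeft_eq]
        ring_nf

-- outer loop: the per-bit invariant res = tot % MOD is preserved over any bit list
theorem outer (bits : List Nat) (A : List Int) : ∀ (res tot : Int), res = tot % 998244353 →
    bits.foldl (fun res i => (A.foldl (stepA i) (0, 0, 0, 0, res)).2.2.2.2) res =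
      (bits.foldl (fun tot i =>
        ((PySem.List.enumerate A 1).foldl (stepB i) (0, 1, 0, 0, 0, tot)).2.2.2.2.2) tot) % 998244353 := by
  induction bits with
  | nil => intro res tot h; simpa using h
  | cons i bits ih =>
      intro res tot h
      simp only [List.foldl_cons]
      exact ih _ _ (by
        have := inner i A 0 0 0 0 0 res 0 1 0 0 0 tot
          (Or.inl ⟨rfl, by ring, rfl, by ring, by ring⟩) h
        simpa using this)

-- ===== VERDICT (by name: the statement is the Claim_ definition above) =====
theorem solve_spec : Claim_equal_solve := by
  intro N A _
  unfold Spec_solve solve solve_alt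
  exact outer (List.range 30) A 0 0 (by norm_num)
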